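-- pv_equiv track=rewrite | github.com/gabrielegrillo/Fondamenti1-Unical | E1.py | controllosintattico
-- ===== SOURCE A (Python) =====
-- def controllosintattico(s):
--     if ((s[0] >= '0' and s[0] <= '9' ) or (s[0] == ' ')):
--         return False
--     else:
--         esito = True
--         for i in range(1,len(s)):
--             if (s[i] <= '/'):
--                 esito = False
--             else:
--                 if (s[i] >= ':' and s[i] <= '@'):
--                     esito = False
--                 else:
--                     if (s[i] >= '[' and s[i] <= '`' and s[i] != '_'):
--                         esito = False
--                     else:
--                         if (s[i] >= '{'):
--                             esito = False
--         return esito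
-- ===== SOURCE B (Python) =====
-- _ALLOWED = "0123456789ABCDEFGHIJKLMNOPQRSTUVWXYZ_abcdefghijklmnopqrstuvwxyz"
--
--
-- def controllosintattico(s):
--     if ('0' <= s[0] <= '9') or s[0] == ' ':
--         return False
--     # peel allowed characters off both ends of the tail; nothing may survive
--     return s[1:].strip(_ALLOWED) == ''
-- ===== Notes on version B (the rewrite author's own statement) =====
-- stated objective: faster
-- what changed: replaces A's interpreted per-character loop (sticky flag, four-branch ASCII range cascade) by a loop-free reduction: str.strip with the allowed alphabet peels valid characters off both ends of the tail in C, and the tail is valid iff the stripped residue is empty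
import Mathlib
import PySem

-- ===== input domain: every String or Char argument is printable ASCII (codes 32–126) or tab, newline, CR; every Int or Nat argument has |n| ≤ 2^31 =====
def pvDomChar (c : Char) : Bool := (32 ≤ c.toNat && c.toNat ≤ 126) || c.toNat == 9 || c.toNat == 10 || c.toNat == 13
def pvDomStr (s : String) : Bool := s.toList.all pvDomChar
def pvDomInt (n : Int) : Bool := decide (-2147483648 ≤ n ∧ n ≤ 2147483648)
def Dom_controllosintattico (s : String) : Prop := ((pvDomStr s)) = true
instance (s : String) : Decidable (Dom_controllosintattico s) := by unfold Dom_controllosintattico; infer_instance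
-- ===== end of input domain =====

-- B replaces A's sticky-flag four-range loop by a loop-free str.strip reduction:
-- the tail is valid iff stripping the allowed alphabet from it leaves '' (constant-factor faster in Python: C-level strip).
-- Pre_ excludes only the empty string, on which both A and B raise IndexError (s[0]).


-- ===== PORT A =====
-- the body of A's for-loop: the four-branch cascade that may only set esito to False
def pvStepA (esito : Bool) (c : Char) : Bool :=
  if c ≤ '/' then false
  else if decide (':' ≤ c) && decide (c ≤ '@') then false
  else if decide ('[' ≤ c) && decide (c ≤ '`') && (c != '_') then false
  else if decide ('{' ≤ c) then false
  else esito

def controllosintattico (s : String) : Bool :=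
  let cs := s.toList
  match PySem.List.pyGet? cs 0 with
  | none => false          -- s[0] raises IndexError on "" — excluded by Pre_
  | some c0 =>
    if (decide ('0' ≤ c0) && decide (c0 ≤ '9')) || (c0 == ' ') then
      false
    else
      -- for i in range(1, len(s)); i is always in range, so pyGetD is exact
      (PySem.List.pyRange 1 (cs.length : Int) 1).foldl
        (fun esito i => pvStepA esito (PySem.List.pyGetD cs i ' '))
        true

-- ===== PORT B =====
def pvAllowed : List Char :=
  "0123456789ABCDEFGHIJKLMNOPQRSTUVWXYZ_abcdefghijklmnopqrstuvwxyz".toList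

def controllosintattico_alt (s : String) : Bool :=
  match s.toList with
  | [] => false            -- s[0] raises IndexError on "" — excluded by Pre_
  | c0 :: rest =>          -- rest = s[1:]
    if (decide ('0' ≤ c0) && decide (c0 ≤ '9')) || (c0 == ' ') then false
    else PySem.Chars.stripChars rest pvAllowed == []   -- s[1:].strip(_ALLOWED) == ''

-- ===== PRECONDITION & SPEC =====
-- Pre_ excludes only the empty string, on which both A and B raise IndexError (s[0]).
def Pre_controllosintattico (s : String) : Prop := s.toList ≠ []
instance (s : String) : Decidable (Pre_controllosintattico s) := by unfold Pre_controllosintattico; infer_instance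
def pvWitness_controllosintattico : String := "ab_3"

def Spec_controllosintattico (s : String) (out : Bool) : Prop := out = controllosintattico_alt s
instance (s : String) (out : Bool) : Decidable (Spec_controllosintattico s out) := by unfold Spec_controllosintattico; infer_instance

-- ===== CLAIM =====
def Claim_equal_controllosintattico : Prop := ∀ (s : String), Dom_controllosintattico s → Pre_controllosintattico s → Spec_controllosintattico s (controllosintattico s)

-- ===== LEMMAS AND PROOFS =====

-- A's cascade rejects exactly the complement of the allowed alphabet (for every Char).
set_option maxRecDepth 4000 in
theorem pv_step_eq (c : Char) (b : Bool) :
    pvStepA b c = (b && pvAllowed.contains c) := by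
  unfold pvStepA
  cases b
  · split_ifs <;> simp
  · have h : pvAllowed = ['0', '1', '2', '3', '4', '5', '6', '7', '8', '9', 'A', 'B', 'C', 'D', 'E', 'F', 'G', 'H', 'I', 'J', 'K', 'L', 'M', 'N', 'O', 'P', 'Q', 'R', 'S', 'T', 'U', 'V', 'W', 'X', 'Y', 'Z', '_', 'a', 'b', 'c', 'd', 'e', 'f', 'g', 'h', 'i', 'j', 'k', 'l', 'm', 'n', 'o', 'p', 'q', 'r', 's', 't', 'u', 'v', 'w', 'x', 'y', 'z'] := by decide
    rw [h]
    simp only [List.contains, List.elem_eq_mem]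
    apply Bool.eq_iff_iff.mpr
    simp only [Char.le_def, Char.ext_iff, UInt32.le_iff_toNat_le, UInt32.ext_iff,
      decide_eq_true_eq, Bool.and_eq_true, bne_iff_ne, ne_eq,
      List.mem_cons, List.not_mem_nil,
      show '/'.val.toNat = 47 from rfl, show '0'.val.toNat = 48 from rfl, show '1'.val.toNat = 49 from rfl, show '2'.val.toNat = 50 from rfl, show '3'.val.toNat = 51 from rfl, show '4'.val.toNat = 52 from rfl, show '5'.val.toNat = 53 from rfl, show '6'.val.toNat = 54 from rfl, show '7'.val.toNat = 55 from rfl, show '8'.val.toNat = 56 from rfl, show '9'.val.toNat = 57 from rfl, show ':'.val.toNat = 58 from rfl, show '@'.val.toNat = 64 from rfl, show 'A'.val.toNat = 65 from rfl, show 'B'.val.toNat = 66 from rfl, show 'C'.val.toNat = 67 from rfl, show 'D'.val.toNat = 68 from rfl, show 'E'.val.toNat = 69 from rfl, show 'F'.val.toNat = 70 from rfl, show 'G'.val.toNat = 71 from rfl, show 'H'.val.toNat = 72 from rfl, show 'I'.val.toNat = 73 from rfl, show 'J'.val.toNat = 74 from rfl, show 'K'.val.toNat = 75 from rfl, show 'L'.val.toNat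 = 76 from rfl, show 'M'.val.toNat = 77 from rfl, show 'N'.val.toNat = 78 from rfl, show 'O'.val.toNat = 79 from rfl, show 'P'.val.toNat = 80 from rfl, show 'Q'.val.toNat = 81 from rfl, show 'R'.val.toNat = 82 from rfl, show 'S'.val.toNat = 83 from rfl, show 'T'.val.toNat = 84 from rfl, show 'U'.val.toNat = 85 from rfl, show 'V'.val.toNat = 86 from rfl, show 'W'.val.toNat = 87 from rfl, show 'X'.val.toNat = 88 from rfl, show 'Y'.val.toNat = 89 from rfl, show 'Z'.val.toNat = 90 from rfl, show '['.val.toNat = 91 from rfl, show '_'.val.toNat = 95 from rfl, show '`'.val.toNat = 96 from rfl, show 'a'.val.toNat = 97 from rfl, show 'b'.val.toNat = 98 from rfl, show 'c'.val.toNat = 99 from rfl, show 'd'.val.toNat = 100 from rfl, show 'e'.val.toNat = 101 from rfl, show 'f'.val.toNat = 102 from rfl, show 'g'.val.toNat = 103 from rfl, show 'h'.val.toNat = 104 from rfl, show 'i'.val.toNat = 105 from rfl, show 'j'.val.toNat = 106 from rfl, show 'k'.val.toNat = 107 from rfl, show 'l'.val.toNat = 108 from rfl, show 'm'.val.toNat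 = 109 from rfl, show 'n'.val.toNat = 110 from rfl, show 'o'.val.toNat = 111 from rfl, show 'p'.val.toNat = 112 from rfl, show 'q'.val.toNat = 113 from rfl, show 'r'.val.toNat = 114 from rfl, show 's'.val.toNat = 115 from rfl, show 't'.val.toNat = 116 from rfl, show 'u'.val.toNat = 117 from rfl, show 'v'.val.toNat = 118 from rfl, show 'w'.val.toNat = 119 from rfl, show 'x'.val.toNat = 120 from rfl, show 'y'.val.toNat = 121 from rfl, show 'z'.val.toNat = 122 from rfl, show '{'.val.toNat = 123 from rfl]
    split_ifs <;> simp_all <;> omega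

-- A's sticky-flag fold is b && all-allowed.
theorem pv_foldl_eq (l : List Char) (b : Bool) :
    l.foldl pvStepA b = (b && l.all (fun c => pvAllowed.contains c)) := by
  induction l generalizing b with
  | nil => simp
  | cons c t ih =>
    rw [List.foldl_cons, ih, pv_step_eq, List.all_cons, Bool.and_assoc]

-- strip of a character class leaves the empty string iff every character is in the class.
theorem pv_strip_empty_iff (chars l : List Char) :
    (PySem.Chars.stripChars l chars == []) = l.all (fun c => chars.contains c) := by
  unfold PySem.Chars.stripChars
  apply Bool.eq_iff_iff.mpr
  simp only [beq_iff_eq, List.reverse_eq_nil_iff, List.dropWhile_eq_nil_iff,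
    List.mem_reverse, List.all_eq_true]
  constructor
  · intro h x hx
    by_cases hp : chars.contains x = true
    · exact hp
    · have hsplit := List.takeWhile_append_dropWhile (p := fun c => chars.contains c) (l := l)
      rw [← hsplit] at hx
      rcases List.mem_append.mp hx with htk | hdw
      · exact List.mem_takeWhile_imp htk
      · exact h x hdw
  · intro h x hx
    exact h x ((List.dropWhile_sublist _).subset hx)

-- ===== VERDICT =====
theorem controllosintattico_spec : Claim_equal_controllosintattico := by
  intro s _ hpre
  unfold Spec_controllosintattico controllosintattico controllosintattico_alt
  cases h : s.toList with
  | nil => exact absurd h hpre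
  | cons c0 rest =>
    simp only [PySem.List.pyGet?_zero_cons]
    by_cases h0 : (decide ('0' ≤ c0) && decide (c0 ≤ '9')) || (c0 == ' ')
    · simp [h0]
    · simp only [h0, if_false, Bool.false_eq_true]
      rw [PySem.List.foldl_pyRange_pyGetD' (c0 :: rest) ' ' pvStepA true (by omega),
        pv_foldl_eq, pv_strip_empty_iff]
      simp
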